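-- pv_equiv track=rewrite | github.com/jeremy873/MyTeam360Application | core/education.py | build_intervention_prompt
-- ===== SOURCE A (Python) =====
-- def build_intervention_prompt(signals: list) -> str:
--     if not signals: return ""
--     parts = ["[INTERVENTION — STUDENT NEEDS EXTRA SUPPORT]"]
--     if any(s["type"] == "frustration_language" for s in signals):
--         parts.append("Student frustrated. Switch approach completely. Acknowledge the difficulty.")
--         parts.append("Try: analogy, visual, real-world example, or break into smallest possible step.")
--     if any(s["type"] == "repeated_struggle" for s in signals):
--         parts.append("Previous approaches failed. Try something totally different.")
--     if any(s["type"] == "very_low_confidence" for s in signals):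
--         parts.append("Confidence very low. Start with what they CAN do. Use 'we' language.")
--     return "\n".join(parts)
-- ===== SOURCE B (Python) =====
-- def build_intervention_prompt(signals: list) -> str:
--     if not signals:
--         return ""
--     # One pass with three flag accumulators, stopping early once all flags are set.
--     frus = rep = conf = False
--     for s in signals:
--         t = s["type"]
--         if t == "frustration_language":
--             frus = True
--         elif t == "repeated_struggle":
--             rep = True
--         elif t == "very_low_confidence":
--             conf = True
--         if frus and rep and conf:
--             break
--     out = "[INTERVENTION — STUDENT NEEDS EXTRA SUPPORT]"
--     if frus:
--         out += "\nStudent frustrated. Switch approach completely. Acknowledge the difficulty."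
--         out += "\nTry: analogy, visual, real-world example, or break into smallest possible step."
--     if rep:
--         out += "\nPrevious approaches failed. Try something totally different."
--     if conf:
--         out += "\nConfidence very low. Start with what they CAN do. Use 'we' language."
--     return out
-- ===== Notes on version B (the rewrite author's own statement) =====
-- stated objective: alternative
-- what changed: B replaces A's three separate any()-scans plus list-and-join assembly with a single pass over signals maintaining three boolean flags (breaking early once all are set) and direct string concatenation of the conditional blocks.
import Mathlib
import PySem

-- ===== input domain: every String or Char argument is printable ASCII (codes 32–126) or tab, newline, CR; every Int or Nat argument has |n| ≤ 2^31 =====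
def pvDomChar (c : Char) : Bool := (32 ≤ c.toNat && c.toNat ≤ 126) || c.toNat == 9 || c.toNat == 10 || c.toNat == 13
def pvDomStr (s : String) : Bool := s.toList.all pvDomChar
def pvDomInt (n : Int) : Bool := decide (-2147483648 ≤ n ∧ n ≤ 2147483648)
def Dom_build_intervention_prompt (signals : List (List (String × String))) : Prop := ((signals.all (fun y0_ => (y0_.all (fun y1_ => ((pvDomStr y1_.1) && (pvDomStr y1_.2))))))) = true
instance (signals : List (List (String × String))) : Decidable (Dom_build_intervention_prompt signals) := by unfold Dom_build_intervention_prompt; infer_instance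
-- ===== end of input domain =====

-- B replaces A's three any()-scans + list/join assembly by ONE pass over signals keeping
-- three boolean flags (with an early break once all are set) and direct string
-- concatenation of the conditional blocks (objective: alternative).

-- ===== PORT A =====
-- s["type"] under Pre_ (key present): total lookup getD is exact there.
def pvTypeOf (s : List (String × String)) : String := (PySem.Dict.mk s).getD "type" ""

def build_intervention_prompt (signals : List (List (String × String))) : String :=
  if signals.isEmpty then "" else
  let parts := ["[INTERVENTION — STUDENT NEEDS EXTRA SUPPORT]"]
  let parts := if signals.any (fun s => pvTypeOf s == "frustration_language") then
      parts ++ ["Student frustrated. Switch approach completely. Acknowledge the difficulty."]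
        ++ ["Try: analogy, visual, real-world example, or break into smallest possible step."]
    else parts
  let parts := if signals.any (fun s => pvTypeOf s == "repeated_struggle") then
      parts ++ ["Previous approaches failed. Try something totally different."] else parts
  let parts := if signals.any (fun s => pvTypeOf s == "very_low_confidence") then
      parts ++ ["Confidence very low. Start with what they CAN do. Use 'we' language."] else parts
  PySem.Str.join "\n" parts

-- ===== PORT B =====
-- B's for-loop with three flag accumulators and the 'break' once all three are set.
def pvScan : List (List (String × String)) → Bool → Bool → Bool → Bool × Bool × Bool
  | [], frus, rep, conf => (frus, rep, conf)
  | s :: rest, frus, rep, conf =>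
    let t := pvTypeOf s
    let st :=
      if t == "frustration_language" then (true, rep, conf)
      else if t == "repeated_struggle" then (frus, true, conf)
      else if t == "very_low_confidence" then (frus, rep, true)
      else (frus, rep, conf)
    if st.1 && st.2.1 && st.2.2 then st else pvScan rest st.1 st.2.1 st.2.2

def build_intervention_prompt_alt (signals : List (List (String × String))) : String :=
  if signals.isEmpty then "" else
  let fl := pvScan signals false false false
  let out := "[INTERVENTION — STUDENT NEEDS EXTRA SUPPORT]"
  let out := if fl.1 then
      out ++ "\nStudent frustrated. Switch approach completely. Acknowledge the difficulty."
          ++ "\nTry: analogy, visual, real-world example, or break into smallest possible step."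
    else out
  let out := if fl.2.1 then out ++ "\nPrevious approaches failed. Try something totally different." else out
  let out := if fl.2.2 then out ++ "\nConfidence very low. Start with what they CAN do. Use 'we' language." else out
  out

-- ===== PRECONDITION & SPEC =====
-- Pre_ excludes signal dicts missing the key "type": A raises KeyError on them whenever
-- an any()-scan reaches such a dict (and whether a scan reaches one is an accident of
-- short-circuit order); B raises KeyError on every missing-"type" dict its loop reaches.
def Pre_build_intervention_prompt (signals : List (List (String × String))) : Prop :=
  ∀ s ∈ signals, ((PySem.Dict.mk s).get? "type").isSome
instance (signals : List (List (String × String))) : Decidable (Pre_build_intervention_prompt signals) := by unfold Pre_build_intervention_prompt; infer_instance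
def pvWitness_build_intervention_prompt : (List (List (String × String))) :=
  [[("type", "frustration_language")], [("type", "other")]]
def Spec_build_intervention_prompt (signals : List (List (String × String))) (out : String) : Prop := out = build_intervention_prompt_alt signals
instance (signals : List (List (String × String))) (out : String) : Decidable (Spec_build_intervention_prompt signals out) := by unfold Spec_build_intervention_prompt; infer_instance

-- ===== CLAIM (what is proved, stated in full; the proofs are below) =====
def Claim_equal_build_intervention_prompt : Prop := ∀ (signals : List (List (String × String))), Dom_build_intervention_prompt signals → Pre_build_intervention_prompt signals → Spec_build_intervention_prompt signals (build_intervention_prompt signals)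

-- ===== LEMMAS AND PROOFS =====
-- The early-breaking flag scan computes exactly the three any()-scans (or-ed with the
-- incoming flags).
theorem pvScan_eq (signals : List (List (String × String))) :
    ∀ frus rep conf, pvScan signals frus rep conf =
      (frus || signals.any (fun s => pvTypeOf s == "frustration_language"),
       rep  || signals.any (fun s => pvTypeOf s == "repeated_struggle"),
       conf || signals.any (fun s => pvTypeOf s == "very_low_confidence")) := by
  induction signals with
  | nil => intro frus rep conf; simp [pvScan]
  | cons s rest ih =>
    intro frus rep conf
    simp only [pvScan, List.any_cons]
    by_cases h1 : pvTypeOf s == "frustration_language"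
    · have e1 := beq_iff_eq.mp h1
      have h2 : (pvTypeOf s == "repeated_struggle") = false := by rw [e1]; decide
      have h3 : (pvTypeOf s == "very_low_confidence") = false := by rw [e1]; decide
      cases rep <;> cases conf <;> simp [h1, h2, h3, ih]
    · by_cases h2 : pvTypeOf s == "repeated_struggle"
      · have e2 := beq_iff_eq.mp h2
        have h3 : (pvTypeOf s == "very_low_confidence") = false := by rw [e2]; decide
        cases frus <;> cases conf <;> simp [h1, h2, h3, ih]
      · by_cases h3 : pvTypeOf s == "very_low_confidence"
        · cases frus <;> cases rep <;> simp [h1, h2, h3, ih]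
        · cases frus <;> cases rep <;> cases conf <;> simp [h1, h2, h3, ih]

-- ===== VERDICT (by name: the statement is the Claim_ definition above) =====
set_option maxRecDepth 8000 in
theorem build_intervention_prompt_spec : Claim_equal_build_intervention_prompt := by
  intro signals _ _
  unfold Spec_build_intervention_prompt build_intervention_prompt build_intervention_prompt_alt
  cases hE : signals.isEmpty
  case true => simp [hE]
  case false =>
    simp only [Bool.false_eq_true, if_false, pvScan_eq, Bool.false_or]
    rcases hf : signals.any (fun s => pvTypeOf s == "frustration_language") <;>
    rcases hr : signals.any (fun s => pvTypeOf s == "repeated_struggle") <;>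
    rcases hv : signals.any (fun s => pvTypeOf s == "very_low_confidence") <;>
    simp only [hf, hr, hv, Bool.false_eq_true, if_false, if_true] <;> decide
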